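/- GENERATED by mk_final_copies.py from the proof of the farm's unit `imdct_step3_inner_s_loop.3` (farm:imdct_step3_inner_s_loop.3.2: Proof.lean) as the
   re-elaboration sweep compiled it — do not edit. -/
import Asan.CheckWalk
import Vorbis.Spec.Units.imdct_step3_inner_s_loop_3
open X86 X86.User Asan Vorbis Vorbis.Spec

set_option maxRecDepth 4000
set_option maxHeartbeats 4000000

/-- Segment 3 of `imdct_step3_inner_s_loop` (`loop1` = 0x1062bc … 0x1062d3: `test r13d, r13d ; jg cut1`, else the epilogue
`add rsp, 38H ; pop rbx ; pop rbp ; pop r12 ; pop r13 ; pop r14 ; pop r15 ; ret`; C lines 2547 and 2579). The segment STARTS at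
the loop head with the invariant `AtHead` (opened field by field) and has TWO exits: the assertion `AtBody` at `cut1` (rebuilt
from the entry assertion's fields: nothing changed but RIP and the status flags; `s < n'` comes from the branch), and the
function's `Returned`, made with `Returned.mk` by hand (`saved` from the popped slots, `same` and the post from the carried
fields). No memory is written, no check site. -/
theorem Vorbis.Spec.Worked.imdct_step3_inner_s_loop_3_ok : Vorbis.Spec.imdct_step3_inner_s_loop_3.Statement := by
  intro Lay hLay μ hμ u₀ hcode others frames len i0 koff k0 aoff ue ret s v hv
  -- 1. the entry assertion `AtHead`, field by field
  obtain ⟨hrip, hbody, hle, hcnt, hk0reg, hee0, hee2⟩ := hv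
  obtain ⟨he, hpre, hcodeok, habi, hframe, hsame, hshadow⟩ := hbody
  obtain ⟨hrsp, sret, s15, s14, s13, s12, sbp, sbx⟩ := hframe
  -- the ENTRY state's facts (about `ue`); `he0` keeps the folded `AtEntry` for the exit assertion
  have he0 := he
  v_entry he
  -- 2. the PRESENT state's facts under the names the walker reads
  have hdf := habi.1
  have hmx := habi.2
  have hsse : SseOK v := sseOK_of_abiInv habi
  -- 3. + 4. the six slots and the return address are in the context (`sret`, `s15` … `sbx`); the walk
  u_walk hcode [hμ.vendor] until [Vorbis.L.imdct_step3_inner_s_loop.cut1] span [Vorbis.L.textLo, Vorbis.L.textHi] side (v_side)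
  · -- 0x1062bf `jg` taken, to `cut1` = 0x106010 (line 2547, `i > 0`): `r13d > 0`, so `s < n'`; nothing changed but RIP and the flags
    refine ReachVia.done (Or.inl ⟨w_rip, ⟨⟨he0, hpre, w_eq, ?_, ⟨?_, ?_, ?_, ?_, ?_, ?_, ?_, ?_⟩, ?_, ?_⟩, hle, ?_, ?_, ?_, ?_⟩, ?_⟩)
    · -- the ABI invariant: DF and MXCSR are as before
      v_inv
    · -- the steady stack pointer
      rw [w_kept .rsp rfl]
      exact hrsp
    · -- the return address slot
      rw [w_mem]
      exact sret
    · -- the saved r15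
      rw [w_mem]
      exact s15
    · -- the saved r14
      rw [w_mem]
      exact s14
    · -- the saved r13
      rw [w_mem]
      exact s13
    · -- the saved r12
      rw [w_mem]
      exact s12
    · -- the saved rbp
      rw [w_mem]
      exact sbp
    · -- the saved rbx
      rw [w_mem]
      exact sbx
    · -- the footprint so far: no store in this segment
      rw [w_mem]
      exact hsame
    · -- no shadow byte written
      rw [w_mem]
      exact hshadow
    · -- `r13d = n' − s`
      rw [w_kept .r13 rfl]
      exact hcnt
    · -- `r15d = k0`
      rw [w_kept .r15 rfl]
      exact hk0reg
    · -- `rbp = ee0 − 4 k0 s`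
      rw [w_kept .rbp rfl]
      exact hee0
    · -- `rbx = ee2 − 4 k0 s`
      rw [w_kept .rbx rfl]
      exact hee2
    · -- `s < n'` from the branch: r13d ≠ 0
      have h13 := hbr_1062bf.1
      rw [Asan.part32_toNat] at h13
      omega
  · -- 0x1062c5 … 0x1062d3, the epilogue (line 2579): the contract's `Returned`
    refine ReachVia.done (Or.inr ?_)
    refine X86.User.Returned.mk w_rip w_rsp ?r_saved ?r_same (Vorbis.conv_code_in w_eq) ?r_inv ?r_post
    case r_saved =>
      -- the six callee-saved registers were popped back from their slots
      intro r hr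
      cases r <;> first
        | exact absurd hr (by decide)
        | (with_reducible assumption)
    case r_same =>
      -- the footprint: nothing was stored in this segment
      rw [w_mem]
      exact hsame
    case r_inv => v_inv
    case r_post =>
      -- the post: no shadow byte was written since the entry
      show ShadowUntouched ue.mem s_1062d3.mem
      rw [w_mem]
      exact hshadow
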